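-- pv_equiv track=rewrite | github.com/laChicotte/Strips-Planification-With-French-NLP | langageNaturel.py | split_into_commands
-- ===== SOURCE A (Python) =====
-- def split_into_commands(texte):
--     """Sépare une demande en commandes individuelles (virgule ou 'et')."""
--     parties = texte.split(',')
--     commandes = []
--     for partie in parties:
--         sous_parties = partie.split(' et ')
--         for sp in sous_parties:
--             sp = sp.strip()
--             if sp:
--                 commandes.append(sp)
--     return commandes
-- ===== SOURCE B (Python) =====
-- def split_into_commands(texte):
--     """Single left-to-right scan: cut at each ',' or ' et ', strip and keep non-empty pieces."""
--     commandes = []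
--
--     def flush(buf):
--         piece = ''.join(buf).strip()
--         if piece:
--             commandes.append(piece)
--
--     buf = []
--     i, n = 0, len(texte)
--     while i < n:
--         c = texte[i]
--         if c == ',':
--             flush(buf)
--             buf = []
--             i += 1
--         elif texte.startswith(' et ', i):
--             flush(buf)
--             buf = []
--             i += 4
--         else:
--             buf.append(c)
--             i += 1
--     flush(buf)
--     return commandes
-- ===== Notes on version B (the rewrite author's own statement) =====
-- stated objective: alternative
-- what changed: Replaces the two nested delimiter-split passes of A with a single left-to-right character scan that cuts the text at each delimiter occurrence, stripping and collecting the non-empty pieces in one pass.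
import Mathlib
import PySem

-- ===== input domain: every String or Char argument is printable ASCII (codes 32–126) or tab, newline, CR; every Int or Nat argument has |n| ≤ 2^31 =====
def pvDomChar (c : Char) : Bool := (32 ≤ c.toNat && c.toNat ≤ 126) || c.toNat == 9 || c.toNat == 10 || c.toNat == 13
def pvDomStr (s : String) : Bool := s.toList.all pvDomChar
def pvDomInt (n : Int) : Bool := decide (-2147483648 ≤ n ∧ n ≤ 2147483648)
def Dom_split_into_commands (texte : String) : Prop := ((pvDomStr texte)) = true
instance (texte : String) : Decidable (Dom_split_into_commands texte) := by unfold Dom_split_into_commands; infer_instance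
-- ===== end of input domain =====

-- B replaces A's two nested delimiter-split passes by a single left-to-right character scan; alternative decomposition, same cost.

-- ===== PORT A =====
def split_into_commands (texte : String) : List String :=
  let parties := PySem.Chars.splitOn texte.toList [',']
  parties.foldl
    (fun commandes partie =>
      (PySem.Chars.splitOn partie [' ', 'e', 't', ' ']).foldl
        (fun commandes sp =>
          let sp2 := PySem.Chars.strip sp
          if sp2 ≠ [] then commandes ++ [String.ofList sp2] else commandes)
        commandes)
    []

-- ===== PORT B =====
def pvFlush (buf : List Char) (commandes : List String) : List String :=
  let piece := PySem.Chars.strip buf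
  if piece ≠ [] then commandes ++ [String.ofList piece] else commandes

def pvScan (cs buf : List Char) (commandes : List String) : List String :=
  match cs with
  | [] => pvFlush buf commandes
  | c :: rest =>
    if c = ',' then pvScan rest [] (pvFlush buf commandes)
    else if PySem.Chars.startswith (c :: rest) [' ', 'e', 't', ' '] then
      pvScan ((c :: rest).drop 4) [] (pvFlush buf commandes)
    else pvScan rest (buf ++ [c]) commandes
termination_by cs.length
decreasing_by
  all_goals (simp [List.length_drop]; try omega)

def split_into_commands_alt (texte : String) : List String :=
  pvScan texte.toList [] []


-- ===== PRECONDITION & SPEC =====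
def Spec_split_into_commands (texte : String) (out : List String) : Prop := out = split_into_commands_alt texte
instance (texte : String) (out : List String) : Decidable (Spec_split_into_commands texte out) := by unfold Spec_split_into_commands; infer_instance

-- ===== CLAIM (what is proved, stated in full; the proofs are below) =====
def Claim_equal_split_into_commands : Prop := ∀ (texte : String), Dom_split_into_commands texte → Spec_split_into_commands texte (split_into_commands texte)

-- ===== LEMMAS AND PROOFS =====
-- pvSplit is a clean structural recursion equal to PySem.Chars.splitOn (for a non-empty
-- separator); both ports are reduced to folds over pvSplit-pieces and compared there.
def pvMapHead (f : List Char → List Char) : List (List Char) → List (List Char)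
  | [] => [f []]
  | p :: ps => f p :: ps

def pvSplit (sep : List Char) (cs : List Char) : List (List Char) :=
  match cs with
  | [] => [[]]
  | c :: rest =>
    if sep.isPrefixOf (c :: rest) ∧ sep ≠ [] then
      [] :: pvSplit sep ((c :: rest).drop sep.length)
    else pvMapHead (c :: ·) (pvSplit sep rest)
termination_by cs.length
decreasing_by
  · rename_i hh
    have h1 : 0 < sep.length := List.length_pos_of_ne_nil hh.2
    simp only [List.length_drop, List.length_cons]
    omega
  · simp

theorem pvMapHead_ne_nil (f : List Char → List Char) (l : List (List Char)) : pvMapHead f l ≠ [] := by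
  cases l <;> simp [pvMapHead]

theorem pvSplit_ne_nil (sep cs : List Char) : pvSplit sep cs ≠ [] := by
  cases cs with
  | nil => simp [pvSplit]
  | cons c rest =>
    rw [pvSplit]
    split
    · simp
    · exact pvMapHead_ne_nil _ _

theorem pvMapHead_comp (f g : List Char → List Char) (l : List (List Char)) :
    pvMapHead f (pvMapHead g l) = pvMapHead (fun x => f (g x)) l := by
  cases l <;> simp [pvMapHead]

theorem pvGo_spec (sep : List Char) (hs : sep ≠ []) :
    ∀ (fuel : Nat) (l cur : List Char) (acc : List (List Char)), l.length < fuel →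
      PySem.Chars.splitOn.go sep fuel l cur acc = acc.reverse ++ pvMapHead (cur.reverse ++ ·) (pvSplit sep l) := by
  intro fuel
  induction fuel with
  | zero => intro l cur acc h; omega
  | succ n ih =>
    intro l cur acc h
    cases l with
    | nil =>
      simp [PySem.Chars.splitOn.go, pvSplit, pvMapHead]
    | cons c rest =>
      rw [PySem.Chars.splitOn.go]
      by_cases hp : sep.isPrefixOf (c :: rest)
      · simp only [hp, if_true]
        rw [ih _ _ _ (by
          have h1 : 0 < sep.length := List.length_pos_of_ne_nil hs
          simp only [List.length_drop, List.length_cons] at h ⊢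
          omega)]
        rw [pvSplit]
        simp only [hp, hs, if_true, and_true, ne_eq, not_false_iff]
        obtain ⟨p, ps, hsplit⟩ : ∃ p ps, pvSplit sep ((c :: rest).drop sep.length) = p :: ps := by
          cases hx : pvSplit sep ((c :: rest).drop sep.length) with
          | nil => exact absurd hx (pvSplit_ne_nil _ _)
          | cons p ps => exact ⟨p, ps, rfl⟩
        simp [hsplit, pvMapHead]
      · rw [pvSplit]
        simp only [hp, Bool.false_eq_true, false_and, if_false]
        rw [ih _ _ _ (by simp only [List.length_cons] at h; omega)]
        rw [pvMapHead_comp]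
        simp [List.append_assoc]

theorem splitOn_eq_pvSplit (sep : List Char) (hs : sep ≠ []) (cs : List Char) :
    PySem.Chars.splitOn cs sep = pvSplit sep cs := by
  unfold PySem.Chars.splitOn
  rw [pvGo_spec sep hs _ _ _ _ (by omega)]
  obtain ⟨p, ps, hsplit⟩ : ∃ p ps, pvSplit sep cs = p :: ps := by
    cases hx : pvSplit sep cs with
    | nil => exact absurd hx (pvSplit_ne_nil _ _)
    | cons p ps => exact ⟨p, ps, rfl⟩
  simp [hsplit, pvMapHead]

def pvEt : List Char := [' ', 'e', 't', ' ']

theorem prefix_drop_append_iff (sep a x : List Char) (j : Nat) (h : sep.length + j ≤ a.length) :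
    sep <+: (a ++ x).drop j ↔ sep <+: a.drop j := by
  rw [List.drop_append_of_le_length (by omega)]
  constructor
  · intro hp
    exact (List.isPrefix_append_of_length (by simp [List.length_drop]; omega)).mp hp
  · intro hp
    exact hp.trans (List.prefix_append _ _)

theorem pvSplit_no_occ (sep : List Char) (u : List Char)
    (h : ∀ j < u.length, ¬ sep <+: u.drop j) : pvSplit sep u = [u] := by
  induction u with
  | nil => simp [pvSplit]
  | cons c t ih =>
    have hp : ¬ sep.isPrefixOf (c :: t) = true := by
      rw [List.isPrefixOf_iff_prefix]
      simpa using h 0 (by simp)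
    rw [pvSplit]
    simp only [hp, Bool.false_eq_true, false_and, if_false]
    rw [ih (fun j hj => by simpa using h (j+1) (by simpa using hj))]
    simp [pvMapHead]

theorem pvSplit_comma_append (u v : List Char) (h : ',' ∉ u) :
    pvSplit [','] (u ++ v) = pvMapHead (u ++ ·) (pvSplit [','] v) := by
  induction u with
  | nil =>
    obtain ⟨p, ps, hx⟩ : ∃ p ps, pvSplit [','] v = p :: ps := by
      cases hx : pvSplit [','] v with
      | nil => exact absurd hx (pvSplit_ne_nil _ _)
      | cons p ps => exact ⟨p, ps, rfl⟩
    simp [hx, pvMapHead]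
  | cons c u' ih =>
    have hc : ¬ c = ',' := fun hc => h (by simp [hc])
    have hp : ¬ [','].isPrefixOf (c :: (u' ++ v)) = true := by
      rw [List.isPrefixOf_iff_prefix]
      intro ⟨t, ht⟩
      simp at ht
      exact hc ht.1.symm
    rw [List.cons_append, pvSplit]
    simp only [hp, Bool.false_eq_true, false_and, if_false]
    rw [ih (fun hm => h (by simp [hm]))]
    rw [pvMapHead_comp]
    simp

theorem pvSplit_comma_cut (u v : List Char) (h : ',' ∉ u) :
    pvSplit [','] (u ++ ',' :: v) = u :: pvSplit [','] v := by
  rw [pvSplit_comma_append u _ h]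
  rw [pvSplit]
  simp [pvMapHead]

theorem pvSplit_et_cut (u v : List Char)
    (h : ∀ j < u.length, ¬ pvEt <+: (u ++ pvEt ++ v).drop j) :
    pvSplit pvEt (u ++ pvEt ++ v) = u :: pvSplit pvEt v := by
  induction u with
  | nil =>
    simp only [List.nil_append, pvEt, List.cons_append]
    rw [pvSplit]
    have hp : ([' ', 'e', 't', ' '] : List Char).isPrefixOf (' ' :: 'e' :: 't' :: ' ' :: v) = true := by
      rw [List.isPrefixOf_iff_prefix]
      exact ⟨v, by simp⟩
    simp only [hp, ne_eq, reduceCtorEq, not_false_iff, and_true, if_pos]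
    rfl
  | cons c u' ih =>
    have hp : ¬ pvEt.isPrefixOf (c :: (u' ++ pvEt ++ v)) = true := by
      rw [List.isPrefixOf_iff_prefix]
      simpa using h 0 (by simp)
    rw [show ((c :: u') ++ pvEt ++ v : List Char) = c :: (u' ++ pvEt ++ v) by simp]
    rw [pvSplit]
    simp only [hp, Bool.false_eq_true, false_and, if_false]
    rw [ih (fun j hj => by simpa using h (j+1) (by simp; omega))]
    simp [pvMapHead]

-- proof-side defs
def pvG (acc : List String) (sp : List Char) : List String :=
  let sp2 := PySem.Chars.strip sp
  if sp2 ≠ [] then acc ++ [String.ofList sp2] else acc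

def pvAll (s : List Char) : List (List Char) :=
  (pvSplit [','] s).flatMap (pvSplit pvEt)

theorem pvA_char (texte : String) :
    split_into_commands texte = (pvAll texte.toList).foldl pvG [] := by
  unfold split_into_commands pvAll
  rw [splitOn_eq_pvSplit [','] (by simp), List.foldl_flatMap]
  simp only [splitOn_eq_pvSplit [' ', 'e', 't', ' '] (by simp)]
  rfl

theorem pvH_to_buf (sep buf cs : List Char) (j : Nat) (hj : j < buf.length)
    (h : ¬ sep <+: (buf ++ cs).drop j) : ¬ sep <+: buf.drop j := fun hp =>
  h (by rw [List.drop_append_of_le_length (le_of_lt hj)]; exact hp.trans (List.prefix_append _ _))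

theorem pvComma_notin (buf cs : List Char)
    (H : ∀ j < buf.length, ¬([','] <+: (buf ++ cs).drop j) ∧ ¬(pvEt <+: (buf ++ cs).drop j)) :
    ',' ∉ buf := by
  intro hm
  obtain ⟨j, hj, hbj⟩ := List.getElem_of_mem hm
  apply (H j hj).1
  rw [List.drop_append_of_le_length (le_of_lt hj), ← List.getElem_cons_drop hj, hbj]
  exact ⟨List.drop (j + 1) buf ++ cs, by simp⟩

theorem pvScan_spec : ∀ (cs buf : List Char) (acc : List String),
    (∀ j < buf.length, ¬([','] <+: (buf ++ cs).drop j) ∧ ¬(pvEt <+: (buf ++ cs).drop j)) →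
    pvScan cs buf acc = (pvAll (buf ++ cs)).foldl pvG acc := by
  intro cs buf acc
  induction cs, buf, acc using pvScan.induct with
  | case1 buf acc =>
    intro H
    rw [pvScan]
    simp only [List.append_nil] at H ⊢
    have hb1 : ∀ j < buf.length, ¬ ([','] : List Char) <+: buf.drop j :=
      fun j hj => pvH_to_buf _ _ [] j hj (by simpa using (H j hj).1)
    have hb2 : ∀ j < buf.length, ¬ pvEt <+: buf.drop j :=
      fun j hj => pvH_to_buf _ _ [] j hj (by simpa using (H j hj).2)
    unfold pvAll
    rw [pvSplit_no_occ [','] buf hb1]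
    rw [List.flatMap_cons, pvSplit_no_occ pvEt buf hb2]
    rfl
  | case2 buf acc rest ih =>
    intro H
    rw [pvScan, if_pos rfl]
    rw [ih (fun j hj => absurd hj (by simp))]
    have hcb : ',' ∉ buf := pvComma_notin buf (',' :: rest) H
    have hb2 : ∀ j < buf.length, ¬ pvEt <+: buf.drop j :=
      fun j hj => pvH_to_buf _ _ _ j hj (H j hj).2
    unfold pvAll
    rw [pvSplit_comma_cut buf rest hcb]
    rw [List.flatMap_cons, pvSplit_no_occ pvEt buf hb2]
    simp only [List.nil_append, List.singleton_append, List.foldl_cons]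
    rfl
  | case3 buf acc c rest h1 h2 ih =>
    intro H
    obtain ⟨v, hv⟩ : ∃ v, (c :: rest) = pvEt ++ v := by
      have hpre := (PySem.Chars.startswith_iff (c :: rest) [' ', 'e', 't', ' ']).mp h2
      obtain ⟨v, hv⟩ := hpre
      exact ⟨v, hv.symm⟩
    have hdrop : (c :: rest).drop 4 = v := by
      rw [hv, show (4 : Nat) = pvEt.length from rfl, List.drop_left]
    rw [pvScan, if_neg h1, if_pos h2]
    rw [ih (fun j hj => absurd hj (by simp))]
    rw [hdrop]
    have hcb : ',' ∉ buf := pvComma_notin buf (c :: rest) H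
    have hcu : ',' ∉ buf ++ pvEt := by
      intro hm
      rcases List.mem_append.mp hm with hm | hm
      · exact hcb hm
      · simp [pvEt] at hm
    unfold pvAll
    rw [hv, show buf ++ (pvEt ++ v) = (buf ++ pvEt) ++ v from (List.append_assoc _ _ _).symm]
    rw [pvSplit_comma_append _ _ hcu]
    obtain ⟨w, ws, hw⟩ : ∃ w ws, pvSplit [','] v = w :: ws := by
      cases hx : pvSplit [','] v with
      | nil => exact absurd hx (pvSplit_ne_nil _ _)
      | cons w ws => exact ⟨w, ws, rfl⟩
    rw [hw]
    simp only [pvMapHead, List.flatMap_cons, List.nil_append]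
    have hEt : ∀ j < buf.length, ¬ pvEt <+: ((buf ++ pvEt) ++ w).drop j := by
      intro j hj hp
      have hx1 := (prefix_drop_append_iff pvEt (buf ++ pvEt) w j
        (by simp [pvEt]; omega)).mp hp
      have hx2 := (prefix_drop_append_iff pvEt (buf ++ pvEt) v j
        (by simp [pvEt]; omega)).mpr hx1
      exact (H j hj).2 (by rw [hv, ← List.append_assoc]; exact hx2)
    rw [show (buf ++ pvEt) ++ w = buf ++ pvEt ++ w from rfl, pvSplit_et_cut buf w hEt]
    simp only [List.cons_append, List.foldl_cons]
    rw [hw, List.flatMap_cons]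
    rfl
  | case4 buf acc c rest h1 h2 ih =>
    intro H
    rw [pvScan, if_neg h1, if_neg h2]
    have heq : (buf ++ [c]) ++ rest = buf ++ (c :: rest) := by simp
    rw [ih ?_]
    · rw [heq]
    · intro j hj
      rw [heq]
      simp only [List.length_append, List.length_cons] at hj
      rcases Nat.lt_or_ge j buf.length with hlt | hge
      · exact H j hlt
      · have hj' : j = buf.length := by simp at hj; omega
        subst hj'
        rw [List.drop_left]
        constructor
        · intro ⟨t, ht⟩
          simp at ht
          exact h1 ht.1.symm
        · intro hp
          exact h2 ((PySem.Chars.startswith_iff (c :: rest) [' ', 'e', 't', ' ']).mpr hp)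
  
theorem pvB_char (texte : String) :
    split_into_commands_alt texte = (pvAll texte.toList).foldl pvG [] := by
  unfold split_into_commands_alt
  rw [pvScan_spec texte.toList [] [] (fun j hj => absurd hj (by simp))]
  rw [List.nil_append]

-- ===== VERDICT (by name: the statement is the Claim_ definition above) =====
theorem split_into_commands_spec : Claim_equal_split_into_commands := by
  intro texte _hd
  unfold Spec_split_into_commands
  rw [pvA_char, pvB_char]
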